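-- pv_equiv track=rewrite | github.com/meganfzais-spec/brand-contact-enrichment | enrich_contacts.py | pick_best_profile
-- ===== SOURCE A (Python) =====
-- def pick_best_profile(profiles):
--     """From a list of RocketReach profiles, pick the best influencer/social contact.
--     Prefer: influencer/creator in title > social in title > director/head/vp level > first result.
--     """
--     if not profiles:
--         return None
--
--     # Score each profile
--     scored = []
--     for p in profiles:
--         title = (p.get("current_title") or "").lower()
--         score = 0
--         # Strong signals
--         if "influencer" in title:
--             score += 10
--         if "creator" in title:
--             score += 10
--         if "partnership" in title:
--             score += 5
--         if "social" in title:
--             score += 5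
--         # Seniority bonus
--         if any(kw in title for kw in ["director", "head", "vp", "vice president"]):
--             score += 3
--         if any(kw in title for kw in ["senior", "manager", "lead"]):
--             score += 2
--         # Slight penalty for very senior (CMO/CEO probably not the right outreach target)
--         if any(kw in title for kw in ["ceo", "cfo", "coo", "chief"]):
--             score -= 2
--         scored.append((score, p))
--
--     scored.sort(key=lambda x: x[0], reverse=True)
--     return scored[0][1]
-- ===== SOURCE B (Python) =====
-- RULES = [
--     (("influencer",), 10),
--     (("creator",), 10),
--     (("partnership",), 5),
--     (("social",), 5),
--     (("director", "head", "vp", "vice president"), 3),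
--     (("senior", "manager", "lead"), 2),
--     (("ceo", "cfo", "coo", "chief"), -2),
-- ]
--
--
-- def _score(p):
--     title = (p.get("current_title") or "").lower()
--     return sum(w for kws, w in RULES if any(k in title for k in kws))
--
--
-- def pick_best_profile(profiles):
--     """Pick the best influencer/social contact: single pass keeping the first
--     profile with the maximal rules-table score (no sort)."""
--     best = None
--     for p in profiles:
--         s = _score(p)
--         if best is None or s > best[0]:
--             best = (s, p)
--     return best[1] if best is not None else None
-- ===== Notes on version B (the rewrite author's own statement) =====
-- stated objective: idiomatic
-- what changed: The straight-line if-block of score bonuses becomes a static rules table summed in one comprehension, and the stable descending sort plus take-first is replaced by a single-pass strict-greater running maximum (the first maximal profile wins, exactly as the stable reverse sort guarantees).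
import Mathlib
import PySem

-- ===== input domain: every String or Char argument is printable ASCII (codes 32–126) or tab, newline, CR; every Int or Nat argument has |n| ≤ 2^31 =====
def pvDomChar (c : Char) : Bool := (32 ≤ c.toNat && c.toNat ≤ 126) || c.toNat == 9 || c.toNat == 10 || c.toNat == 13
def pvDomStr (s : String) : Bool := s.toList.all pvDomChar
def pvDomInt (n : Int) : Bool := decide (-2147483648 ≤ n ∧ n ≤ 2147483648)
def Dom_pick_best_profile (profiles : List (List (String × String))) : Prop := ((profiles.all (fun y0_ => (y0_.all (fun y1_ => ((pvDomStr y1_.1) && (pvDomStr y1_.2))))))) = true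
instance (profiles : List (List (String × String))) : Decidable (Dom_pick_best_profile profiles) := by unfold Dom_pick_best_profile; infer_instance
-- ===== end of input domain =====

-- B replaces A's if-block scoring by a static rules table and the stable descending
-- sort + take-first by a single-pass strict-greater running maximum (idiomatic; same cost class in practice).

-- ===== PORT A =====
-- title = (p.get("current_title") or "").lower(), then the straight-line if-chain of bonuses
def pvTitleA (p : List (String × String)) : String :=
  PySem.Str.lower
    (match PySem.Dict.get? ⟨p⟩ "current_title" with
     | none => ""
     | some s => if s == "" then "" else s)

def pvScoreA (p : List (String × String)) : Int :=
  let title := pvTitleA p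
  let score : Int := 0
  let score := if PySem.Str.isIn "influencer" title then score + 10 else score
  let score := if PySem.Str.isIn "creator" title then score + 10 else score
  let score := if PySem.Str.isIn "partnership" title then score + 5 else score
  let score := if PySem.Str.isIn "social" title then score + 5 else score
  let score := if ["director", "head", "vp", "vice president"].any (fun kw => PySem.Str.isIn kw title) then score + 3 else score
  let score := if ["senior", "manager", "lead"].any (fun kw => PySem.Str.isIn kw title) then score + 2 else score
  let score := if ["ceo", "cfo", "coo", "chief"].any (fun kw => PySem.Str.isIn kw title) then score - 2 else score
  score

def pick_best_profile (profiles : List (List (String × String))) : Option (List (String × String)) :=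
  if profiles = [] then none
  else
    let scored := profiles.foldl (fun acc p => acc ++ [(pvScoreA p, p)])
      ([] : List (Int × List (String × String)))
    let sortedScored := PySem.List.sorted scored (fun x => x.1) true
    (PySem.List.pyGet? sortedScored 0).map (fun x => x.2)

-- ===== PORT B =====
def pvRules : List (List String × Int) :=
  [ (["influencer"], 10), (["creator"], 10), (["partnership"], 5), (["social"], 5),
    (["director", "head", "vp", "vice president"], 3),
    (["senior", "manager", "lead"], 2),
    (["ceo", "cfo", "coo", "chief"], -2) ]

def pvTitleB (p : List (String × String)) : String :=
  PySem.Str.lower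
    (match PySem.Dict.get? ⟨p⟩ "current_title" with
     | none => ""
     | some s => if s == "" then "" else s)

def pvScoreB (p : List (String × String)) : Int :=
  let title := pvTitleB p
  pvRules.foldl (fun acc r => if r.1.any (fun k => PySem.Str.isIn k title) then acc + r.2 else acc) 0

-- 'if best is None or s > best[0]: best = (s, p)'
def pvStep {α : Type} (best : Option (Int × α)) (x : Int × α) : Option (Int × α) :=
  match best with
  | none => some x
  | some b => if b.1 < x.1 then some x else some b

def pick_best_profile_alt (profiles : List (List (String × String))) : Option (List (String × String)) :=
  (profiles.foldl (fun best p => pvStep best (pvScoreB p, p)) none).map (fun b => b.2)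

-- ===== PRECONDITION & SPEC =====
def Spec_pick_best_profile (profiles : List (List (String × String))) (out : Option (List (String × String))) : Prop := out = pick_best_profile_alt profiles
instance (profiles : List (List (String × String))) (out : Option (List (String × String))) : Decidable (Spec_pick_best_profile profiles out) := by unfold Spec_pick_best_profile; infer_instance

-- ===== CLAIM (what is proved, stated in full; the proofs are below) =====
def Claim_equal_pick_best_profile : Prop := ∀ (profiles : List (List (String × String))), Dom_pick_best_profile profiles → Spec_pick_best_profile profiles (pick_best_profile profiles)

-- ===== LEMMAS AND PROOFS =====

-- the two scorings agree pointwise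
set_option maxHeartbeats 1000000 in
theorem pvScore_eq (p : List (String × String)) : pvScoreA p = pvScoreB p := by
  simp only [pvScoreA, pvScoreB, pvRules, List.foldl_cons, List.foldl_nil,
    List.any_cons, List.any_nil, Bool.or_false,
    show pvTitleB p = pvTitleA p from rfl]
  generalize pvTitleA p = t
  split_ifs <;> rfl

-- inserting (stable, strict descending) moves x to the front iff it beats the head strictly
theorem head?_insertBy {α : Type} (x : Int × α) (l : List (Int × α)) :
    (PySem.List.insertBy (fun a b => decide (b.1 < a.1)) x l).head? = pvStep l.head? x := by
  cases l with
  | nil => rfl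
  | cons y ys =>
    simp only [PySem.List.insertBy, pvStep]
    by_cases h : y.1 < x.1 <;> simp [h]

-- head of the insertion-sort fold = running strict maximum
theorem head?_foldl_insertBy {α : Type} (l acc : List (Int × α)) :
    (l.foldl (fun acc x => PySem.List.insertBy (fun a b => decide (b.1 < a.1)) x acc) acc).head?
      = l.foldl pvStep acc.head? := by
  induction l generalizing acc with
  | nil => rfl
  | cons x xs ih => rw [List.foldl_cons, List.foldl_cons, ih, head?_insertBy]

-- ===== VERDICT (by name: the statement is the Claim_ definition above) =====
theorem pick_best_profile_spec : Claim_equal_pick_best_profile := by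
  intro profiles _
  unfold Spec_pick_best_profile pick_best_profile pick_best_profile_alt
  by_cases h : profiles = []
  · subst h; rfl
  · simp only [h, if_false]
    rw [PySem.List.foldl_append_singleton_eq_map, List.nil_append,
      PySem.List.sorted_rev_eq_foldl_insertBy]
    have : (PySem.List.pyGet?
        ((profiles.map fun p => (pvScoreA p, p)).foldl
          (fun acc x => PySem.List.insertBy (fun a b => decide (b.1 < a.1)) x acc) []) 0)
        = ((profiles.map fun p => (pvScoreA p, p)).foldl
          (fun acc x => PySem.List.insertBy (fun a b => decide (b.1 < a.1)) x acc) []).head? := by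
      cases hl : ((profiles.map fun p => (pvScoreA p, p)).foldl
          (fun acc x => PySem.List.insertBy (fun a b => decide (b.1 < a.1)) x acc) []) with
      | nil => rfl
      | cons a t => simp [PySem.List.pyGet?, PySem.List.pyIdx?]
    rw [this, head?_foldl_insertBy, List.foldl_map]
    simp [pvScore_eq]
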